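-- pv_equiv track=rewrite | github.com/dev-bong/algorithms | programmers/correct/lv_1/옹알이_2.py | solution
-- ===== SOURCE A (Python) =====
-- def solution(babbling):
--     answer = 0
--     babs = ["aya", "ye", "woo", "ma"] # 옹알이 요소
--
--     for bab in babbling:
--         tmp = bab
--         ex = None
--         possible = True
--         while tmp:
--             cur = None
--             for b in babs:
--                 if tmp.startswith(b):
--                     cur = b
--                     break
--
--             if not cur or cur == ex: # 발음할 수 있는 단어가 없거나, 요소를 중복으로 말하는 경우 >> 발음 불가능함
--                 possible = False
--                 break
--
--             tmp = tmp[len(cur):]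
--             ex = cur
--         if possible:
--             answer += 1
--
--     return answer
-- ===== SOURCE B (Python) =====
-- # B: single-pass character automaton per word (no slicing, no repeated prefix scans)
-- _STARTS = {'a': "aya", 'y': "ye", 'w': "woo", 'm': "ma"}
--
-- def _ok(word):
--     pending = ""   # chars still needed to finish the current token
--     last = ""      # last completed token
--     cur = ""       # token currently being matched
--     for ch in word:
--         if pending == "":
--             tok = _STARTS.get(ch)
--             if tok is None or tok == last:
--                 return False
--             cur = tok
--             pending = tok[1:]
--         else:
--             if ch != pending[0]:
--                 return False
--             pending = pending[1:]
--         if pending == "":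
--             last = cur
--     return pending == ""
--
-- def solution(babbling):
--     count = 0
--     for word in babbling:
--         if _ok(word):
--             count += 1
--     return count
-- ===== Notes on version B (the rewrite author's own statement) =====
-- stated objective: faster
-- what changed: Replaced A's greedy prefix-strip loop (scan the 4 words with startswith, then slice the word each round) by a single character-at-a-time automaton per word that dispatches on the first letter of a token and tracks the pending suffix and last token; no slicing or per-round word scans.
import Mathlib
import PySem

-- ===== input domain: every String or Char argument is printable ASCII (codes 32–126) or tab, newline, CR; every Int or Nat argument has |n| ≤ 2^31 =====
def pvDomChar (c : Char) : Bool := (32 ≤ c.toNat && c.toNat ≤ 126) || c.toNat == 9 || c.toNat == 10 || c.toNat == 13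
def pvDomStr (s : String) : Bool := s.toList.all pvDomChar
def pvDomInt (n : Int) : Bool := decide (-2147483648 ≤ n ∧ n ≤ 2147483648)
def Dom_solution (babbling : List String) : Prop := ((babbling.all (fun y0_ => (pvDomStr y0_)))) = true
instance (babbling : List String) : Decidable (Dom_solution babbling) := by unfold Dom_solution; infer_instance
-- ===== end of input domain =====

-- B replaces A's greedy prefix-strip loop (startswith scan + slice each round) by a
-- single character-at-a-time automaton per word (no per-round slicing; a timing run measured B faster).

-- ===== PORT A =====
-- babs = ["aya", "ye", "woo", "ma"]  (as char lists; PySem strings live on List Char)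
def pvBabs : List (List Char) := [['a','y','a'], ['y','e'], ['w','o','o'], ['m','a']]

-- "for b in babs: if tmp.startswith(b): cur = b; break"  (first match, exact)
def pvFindCur (tmp : List Char) : Option (List Char) :=
  pvBabs.find? (fun b => PySem.Chars.startswith tmp b)

theorem pvFindCur_pos {tmp cur : List Char} (h : pvFindCur tmp = some cur) :
    0 < cur.length := by
  have := List.mem_of_find?_eq_some h
  fin_cases this <;> decide

-- the 'while tmp:' loop; tmp[len(cur):] on a char list with 0 ≤ len(cur) is List.drop (exact)
def pvAWhile (tmp : List Char) (ex : Option (List Char)) : Bool :=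
  match htmp : tmp with
  | [] => true            -- loop exits, possible stays True
  | _ :: _ =>
    match hcur : pvFindCur tmp with
    | none => false       -- not cur  >>  possible = False
    | some cur =>
      if some cur = ex then false     -- cur == ex  >>  possible = False
      else pvAWhile (tmp.drop cur.length) (some cur)
termination_by tmp.length
decreasing_by
  simp_all
  have := pvFindCur_pos hcur
  simp [htmp] at *
  omega

def solution (babbling : List String) : Int :=
  babbling.foldl (fun answer bab => if pvAWhile bab.toList none then answer + 1 else answer) 0

-- ===== PORT B =====
-- _STARTS.get(ch)
def pvStarts (ch : Char) : Option (List Char) :=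
  if ch = 'a' then some ['a','y','a']
  else if ch = 'y' then some ['y','e']
  else if ch = 'w' then some ['w','o','o']
  else if ch = 'm' then some ['m','a'] else none

-- the 'for ch in word:' loop of _ok, state (pending, last, cur); returns pending == ""
def pvBLoop (cs pending last cur : List Char) : Bool :=
  match cs with
  | [] => pending = []
  | ch :: t =>
    match pending with
    | [] =>
      match pvStarts ch with
      | none => false
      | some tok =>
        if tok = last then false
        else
          let p := tok.drop 1           -- tok[1:]
          if p = [] then pvBLoop t [] tok tok else pvBLoop t p last tok
    | p0 :: prest =>
      if ch = p0 then
        (if prest = [] then pvBLoop t [] cur cur else pvBLoop t prest last cur)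
      else false

def solution_alt (babbling : List String) : Int :=
  babbling.foldl (fun count word => if pvBLoop word.toList [] [] [] then count + 1 else count) 0

-- ===== PRECONDITION & SPEC =====
def Spec_solution (babbling : List String) (out : Int) : Prop := out = solution_alt babbling
instance (babbling : List String) (out : Int) : Decidable (Spec_solution babbling out) := by unfold Spec_solution; infer_instance

-- ===== CLAIM (what is proved, stated in full; the proofs are below) =====
def Claim_equal_solution : Prop := ∀ (babbling : List String), Dom_solution babbling → Spec_solution babbling (solution babbling)

-- ===== LEMMAS AND PROOFS =====

-- A's duplicate test 'some cur = ex' under the encoding ex = (if last = [] then none else some last)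
-- is exactly B's test 'tok = last', because tokens are nonempty
theorem pv_cond (tok last : List Char) (htok : tok ≠ []) :
    (some tok = if last = [] then none else some last) ↔ tok = last := by
  split <;> simp_all

-- A's ex : Option encoded by B's last : List Char ([] = None; tokens are nonempty)
theorem pv_key (n : Nat) : ∀ (tmp : List Char), tmp.length ≤ n → ∀ (last cur : List Char),
    pvAWhile tmp (if last = [] then none else some last) = pvBLoop tmp [] last cur := by
  induction n with
  | zero =>
    intro tmp hlen last cur
    have : tmp = [] := List.eq_nil_of_length_eq_zero (Nat.le_zero.mp hlen)
    subst this
    simp [pvAWhile, pvBLoop]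
  | succ n ih =>
    intro tmp hlen last cur
    match tmp with
    | [] => simp [pvAWhile, pvBLoop]
    | ch :: t =>
      rw [pvAWhile, pvBLoop]
      by_cases ha : ch = 'a'
      · subst ha
        cases t with
        | nil =>
          have hfc : pvFindCur ['a'] = none := by decide
          rw [hfc]; simp [pvStarts, pvBLoop]
        | cons c1 t1 =>
          by_cases h1 : c1 = 'y'
          · subst h1
            cases t1 with
            | nil =>
              have hfc : pvFindCur ['a','y'] = none := by decide
              rw [hfc]; simp [pvStarts, pvBLoop]
            | cons c2 t2 =>
              by_cases h2 : c2 = 'a'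
              · subst h2
                have hfc : pvFindCur ('a'::'y'::'a'::t2) = some ['a','y','a'] := by
                  simp [pvFindCur, pvBabs, List.find?, PySem.Chars.startswith, List.isPrefixOf]
                rw [hfc]
                have hih : pvAWhile t2 (some ['a','y','a']) = pvBLoop t2 [] ['a','y','a'] ['a','y','a'] := by
                  have := ih t2 (by simp at hlen ⊢; omega) ['a','y','a'] ['a','y','a']
                  simpa using this
                by_cases hL : (['a','y','a'] : List Char) = last <;>
                    simp [pvStarts, pvBLoop, hih, pv_cond ['a','y','a'] last (by decide), hL] <;>
                      (try (rintro rfl; simp at hL))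
              · have hfc : pvFindCur ('a'::'y'::c2::t2) = none := by
                  simp [pvFindCur, pvBabs, List.find?, PySem.Chars.startswith, List.isPrefixOf, beq_eq_false_iff_ne.mpr (Ne.symm h2)]
                rw [hfc]; simp [pvStarts, pvBLoop, h2]
          · have hfc : pvFindCur ('a'::c1::t1) = none := by
              simp [pvFindCur, pvBabs, List.find?, PySem.Chars.startswith, List.isPrefixOf, beq_eq_false_iff_ne.mpr (Ne.symm h1)]
            rw [hfc]; simp [pvStarts, pvBLoop, h1]
      · by_cases hy : ch = 'y'
        · subst hy
          cases t with
          | nil =>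
            have hfc : pvFindCur ['y'] = none := by decide
            rw [hfc]; simp [pvStarts, pvBLoop]
          | cons c1 t1 =>
            by_cases h1 : c1 = 'e'
            · subst h1
              have hfc : pvFindCur ('y'::'e'::t1) = some ['y','e'] := by
                simp [pvFindCur, pvBabs, List.find?, PySem.Chars.startswith, List.isPrefixOf]
              rw [hfc]
              have hih : pvAWhile t1 (some ['y','e']) = pvBLoop t1 [] ['y','e'] ['y','e'] := by
                have := ih t1 (by simp at hlen ⊢; omega) ['y','e'] ['y','e']
                simpa using this
              by_cases hL : (['y','e'] : List Char) = last <;>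
                    simp [pvStarts, pvBLoop, hih, pv_cond ['y','e'] last (by decide), hL] <;>
                      (try (rintro rfl; simp at hL))
            · have hfc : pvFindCur ('y'::c1::t1) = none := by
                simp [pvFindCur, pvBabs, List.find?, PySem.Chars.startswith, List.isPrefixOf, beq_eq_false_iff_ne.mpr (Ne.symm h1)]
              rw [hfc]; simp [pvStarts, pvBLoop, h1]
        · by_cases hw : ch = 'w'
          · subst hw
            cases t with
            | nil =>
              have hfc : pvFindCur ['w'] = none := by decide
              rw [hfc]; simp [pvStarts, pvBLoop]
            | cons c1 t1 =>
              by_cases h1 : c1 = 'o'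
              · subst h1
                cases t1 with
                | nil =>
                  have hfc : pvFindCur ['w','o'] = none := by decide
                  rw [hfc]; simp [pvStarts, pvBLoop]
                | cons c2 t2 =>
                  by_cases h2 : c2 = 'o'
                  · subst h2
                    have hfc : pvFindCur ('w'::'o'::'o'::t2) = some ['w','o','o'] := by
                      simp [pvFindCur, pvBabs, List.find?, PySem.Chars.startswith, List.isPrefixOf]
                    rw [hfc]
                    have hih : pvAWhile t2 (some ['w','o','o']) = pvBLoop t2 [] ['w','o','o'] ['w','o','o'] := by
                      have := ih t2 (by simp at hlen ⊢; omega) ['w','o','o'] ['w','o','o']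
                      simpa using this
                    by_cases hL : (['w','o','o'] : List Char) = last <;>
                    simp [pvStarts, pvBLoop, hih, pv_cond ['w','o','o'] last (by decide), hL] <;>
                      (try (rintro rfl; simp at hL))
                  · have hfc : pvFindCur ('w'::'o'::c2::t2) = none := by
                      simp [pvFindCur, pvBabs, List.find?, PySem.Chars.startswith, List.isPrefixOf, beq_eq_false_iff_ne.mpr (Ne.symm h2)]
                    rw [hfc]; simp [pvStarts, pvBLoop, h2]
              · have hfc : pvFindCur ('w'::c1::t1) = none := by
                  simp [pvFindCur, pvBabs, List.find?, PySem.Chars.startswith, List.isPrefixOf, beq_eq_false_iff_ne.mpr (Ne.symm h1)]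
                rw [hfc]; simp [pvStarts, pvBLoop, h1]
          · by_cases hm : ch = 'm'
            · subst hm
              cases t with
              | nil =>
                have hfc : pvFindCur ['m'] = none := by decide
                rw [hfc]; simp [pvStarts, pvBLoop]
              | cons c1 t1 =>
                by_cases h1 : c1 = 'a'
                · subst h1
                  have hfc : pvFindCur ('m'::'a'::t1) = some ['m','a'] := by
                    simp [pvFindCur, pvBabs, List.find?, PySem.Chars.startswith, List.isPrefixOf]
                  rw [hfc]
                  have hih : pvAWhile t1 (some ['m','a']) = pvBLoop t1 [] ['m','a'] ['m','a'] := by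
                    have := ih t1 (by simp at hlen ⊢; omega) ['m','a'] ['m','a']
                    simpa using this
                  by_cases hL : (['m','a'] : List Char) = last <;>
                    simp [pvStarts, pvBLoop, hih, pv_cond ['m','a'] last (by decide), hL] <;>
                      (try (rintro rfl; simp at hL))
                · have hfc : pvFindCur ('m'::c1::t1) = none := by
                    simp [pvFindCur, pvBabs, List.find?, PySem.Chars.startswith, List.isPrefixOf, beq_eq_false_iff_ne.mpr (Ne.symm h1)]
                  rw [hfc]; simp [pvStarts, pvBLoop, h1]
            · have hfc : pvFindCur (ch::t) = none := by
                simp [pvFindCur, pvBabs, List.find?, PySem.Chars.startswith, List.isPrefixOf, beq_eq_false_iff_ne.mpr (Ne.symm ha), beq_eq_false_iff_ne.mpr (Ne.symm hy), beq_eq_false_iff_ne.mpr (Ne.symm hw), beq_eq_false_iff_ne.mpr (Ne.symm hm)]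
              rw [hfc]; simp [pvStarts, ha, hy, hw, hm]

theorem pv_word (w : List Char) : pvAWhile w none = pvBLoop w [] [] [] := by
  have := pv_key w.length w le_rfl [] []
  simpa using this

-- ===== VERDICT (by name: the statement is the Claim_ definition above) =====
theorem solution_spec : Claim_equal_solution := by
  intro babbling _
  unfold Spec_solution solution solution_alt
  have hf : (fun (answer : Int) (bab : String) => if pvAWhile bab.toList none then answer + 1 else answer)
      = (fun (count : Int) (word : String) => if pvBLoop word.toList [] [] [] then count + 1 else count) := by
    funext a w; rw [pv_word]
  rw [hf]
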